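-- pv_equiv track=rewrite | github.com/pypi-data/pypi-mirror-403 | packages/chord-romanizer/chord_romanizer-0.1.3.tar.gz/chord_romanizer-0.1.3/chord_romanizer/chord_parser.py | normalize_note_pc
-- ===== SOURCE A (Python) =====
-- from typing import Optional
--
-- NOTE_NAMES = ["C", "C#", "D", "D#", "E", "F", "F#", "G", "G#", "A", "A#", "B"]
--
-- NOTE_ALIASES = {
--     "CB": "B",
--     "B#": "C",
--     "DB": "C#",
--     "EB": "D#",
--     "E#": "F",
--     "FB": "E",
--     "GB": "F#",
--     "AB": "G#",
--     "BB": "A#",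
--     "HB": "B",
--     "H": "B",
-- }
--
-- def normalize_note_pc(note: str) -> Optional[str]:
--     """Normalize pitch-class spelling to canonical sharp-based representation."""
--     up = note.strip().upper()
--     # Handle double sharp x
--     if up.endswith("X"):
--         base = up[:-1]
--         if base in NOTE_NAMES or base in NOTE_ALIASES:
--              # Recursively normalize base and add 2 semitones
--              base_pc = normalize_note_pc(base)
--              if base_pc:
--                  idx = NOTE_NAMES.index(base_pc)
--                  return NOTE_NAMES[(idx + 2) % 12]
--
--     if up in NOTE_ALIASES:
--         return NOTE_ALIASES[up]
--     if up in NOTE_NAMES: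
--         return up
--     return None
-- ===== SOURCE B (Python) =====
-- from typing import Optional
--
-- NOTE_NAMES = ["C", "C#", "D", "D#", "E", "F", "F#", "G", "G#", "A", "A#", "B"]
--
-- NOTE_ALIASES = {
--     "CB": "B",
--     "B#": "C",
--     "DB": "C#",
--     "EB": "D#",
--     "E#": "F",
--     "FB": "E",
--     "GB": "F#",
--     "AB": "G#",
--     "BB": "A#",
--     "HB": "B",
--     "H": "B",
-- }
--
-- # Precomputed lookup table: every accepted spelling (plain names, aliases, and
-- # their 'X' double-sharp forms) mapped to its canonical sharp pitch class.
-- TABLE = {}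
-- for _k in NOTE_NAMES + list(NOTE_ALIASES):
--     _pc = NOTE_ALIASES.get(_k, _k)
--     TABLE[_k] = _pc
--     TABLE[_k + "X"] = NOTE_NAMES[(NOTE_NAMES.index(_pc) + 2) % 12]
--
-- def normalize_note_pc(note: str) -> Optional[str]:
--     """Normalize pitch-class spelling to canonical sharp-based representation."""
--     return TABLE.get(note.strip().upper())
-- ===== Notes on version B (the rewrite author's own statement) =====
-- stated objective: simpler
-- what changed: Replaces A's recursion, X-suffix branch, dict/list membership chain and list-index scan by a single module-level table, precomputed once from NOTE_NAMES and NOTE_ALIASES (including the double-sharp X forms), so the function body is one dict lookup.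
import Mathlib
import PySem

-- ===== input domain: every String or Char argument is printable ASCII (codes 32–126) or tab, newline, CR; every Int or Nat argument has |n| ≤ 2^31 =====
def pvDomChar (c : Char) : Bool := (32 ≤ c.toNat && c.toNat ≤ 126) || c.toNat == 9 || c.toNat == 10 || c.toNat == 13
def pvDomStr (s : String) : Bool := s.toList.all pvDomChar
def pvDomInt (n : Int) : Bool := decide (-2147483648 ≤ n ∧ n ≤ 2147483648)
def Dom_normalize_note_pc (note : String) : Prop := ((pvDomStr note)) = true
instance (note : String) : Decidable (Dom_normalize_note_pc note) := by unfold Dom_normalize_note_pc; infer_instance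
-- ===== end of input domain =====

-- B replaces A's recursion, branch chain and list-index scan by a single lookup in a table precomputed once; objective: simpler.

-- ===== PORT A =====
def pvNOTE_NAMES : List String := ["C", "C#", "D", "D#", "E", "F", "F#", "G", "G#", "A", "A#", "B"]

def pvNOTE_ALIASES : PySem.Dict String String := PySem.Dict.ofList [("CB", "B"), ("B#", "C"), ("DB", "C#"), ("EB", "D#"), ("E#", "F"), ("FB", "E"), ("GB", "F#"), ("AB", "G#"), ("BB", "A#"), ("HB", "B"), ("H", "B")]

-- the double-sharp arithmetic done on base_pc = normalize_note_pc(base); `fallback` is Python's fall-through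
-- to the alias/name checks when base_pc is falsy ('if base_pc:').  NOTE_NAMES.index and NOTE_NAMES[(idx+2)%12]
-- are ported by index? / pyGet?; their `none` branches are where Python would raise, both unreachable here
-- (base_pc is always a NOTE_NAME and (idx+2)%12 < 12).
def pvShiftX (base_pc? : Option String) (fallback : Option String) : Option String :=
  match base_pc? with
  | some base_pc =>
    if base_pc ≠ "" then
      match PySem.List.index? pvNOTE_NAMES base_pc with
      | some idx => PySem.List.pyGet? pvNOTE_NAMES (((idx + 2) % 12 : Nat) : Int)
      | none => none
    else fallback
  | none => fallback

-- helper for the termination of the port's recursion (cited in its decreasing_by)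
theorem pv_upper_strip_len (s : String) : (PySem.Str.upper (PySem.Str.strip s)).toList.length ≤ s.toList.length := by
  simp only [pysem, PySem.Chars.upper, PySem.Chars.strip, PySem.Chars.lstrip, PySem.Chars.rstrip, List.length_map, List.length_reverse]
  exact le_trans (List.length_dropWhile_le _ _) (by simpa using List.length_dropWhile_le (fun c => PySem.Chars.isspace c) s.toList)

def normalize_note_pc (note : String) : Option String :=
  let up := PySem.Str.upper (PySem.Str.strip note)
  let fallback :=
    match PySem.Dict.get? pvNOTE_ALIASES up with
    | some v => some v
    | none => if up ∈ pvNOTE_NAMES then some up else none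
  if hx : PySem.Str.endswith up "X" then
    let base := PySem.Str.slice up none (some (-1))
    if base ∈ pvNOTE_NAMES ∨ pvNOTE_ALIASES.contains base = true then
      pvShiftX (normalize_note_pc base) fallback
    else fallback
  else fallback
termination_by note.toList.length
decreasing_by
  simp only [PySem.Str.slice_to_neg_one, List.length_dropLast]
  have h1 : (PySem.Str.upper (PySem.Str.strip note)).toList ≠ [] := by
    rw [PySem.Str.endswith_eq, PySem.Chars.endswith_iff] at hx
    rcases hx with ⟨t, ht⟩
    intro h0
    rw [h0] at ht
    simp at ht
  have h2 := pv_upper_strip_len note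
  have h3 : 0 < (PySem.Str.upper (PySem.Str.strip note)).toList.length := List.length_pos_iff.mpr h1
  omega

-- ===== PORT B =====
-- TABLE built once from NOTE_NAMES and NOTE_ALIASES (as in Source B); the two `none` fallbacks are unreachable
-- (pc is always a NOTE_NAME, and (i+2) % 12 < 12)
def pvTABLE : PySem.Dict String String :=
  (pvNOTE_NAMES ++ PySem.Dict.keys pvNOTE_ALIASES).foldl (fun t k =>
    let pc := PySem.Dict.getD pvNOTE_ALIASES k k
    let t := PySem.Dict.insert t k pc
    match PySem.List.index? pvNOTE_NAMES pc with
    | some i =>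
      match PySem.List.pyGet? pvNOTE_NAMES (((i + 2) % 12 : Nat) : Int) with
      | some v => PySem.Dict.insert t (k ++ "X") v
      | none => t
    | none => t
    ) PySem.Dict.empty

def normalize_note_pc_alt (note : String) : Option String :=
  PySem.Dict.get? pvTABLE (PySem.Str.upper (PySem.Str.strip note))

-- ===== PRECONDITION & SPEC =====
def Spec_normalize_note_pc (note : String) (out : Option String) : Prop := out = normalize_note_pc_alt note
instance (note : String) (out : Option String) : Decidable (Spec_normalize_note_pc note out) := by unfold Spec_normalize_note_pc; infer_instance

-- ===== CLAIM (what is proved, stated in full; the proofs are below) =====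
def Claim_equal_normalize_note_pc : Prop := ∀ (note : String), Dom_normalize_note_pc note → Spec_normalize_note_pc note (normalize_note_pc note)

-- ===== LEMMAS AND PROOFS =====

-- every spelling accepted by either program: the 23 plain keys interleaved with their X forms, in pvTABLE's insertion order
def pvAllKeys : List String := ["C", "CX", "C#", "C#X", "D", "DX", "D#", "D#X", "E", "EX", "F", "FX", "F#", "F#X", "G", "GX", "G#", "G#X", "A", "AX", "A#", "A#X", "B", "BX", "CB", "CBX", "B#", "B#X", "DB", "DBX", "EB", "EBX", "E#", "E#X", "FB", "FBX", "GB", "GBX", "AB", "ABX", "BB", "BBX", "HB", "HBX", "H", "HX"]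

-- the 23 plain keys (NOTE_NAMES and the alias keys)
def pvPlainKeys : List String := ["C", "C#", "D", "D#", "E", "F", "F#", "G", "G#", "A", "A#", "B", "CB", "B#", "DB", "EB", "E#", "FB", "GB", "AB", "BB", "HB", "H"]

set_option maxRecDepth 8192 in
set_option maxHeartbeats 1000000 in
theorem pv_keys_table : PySem.Dict.keys pvTABLE = pvAllKeys := by decide

set_option maxRecDepth 8192 in
theorem pv_mk_mem : ∀ b ∈ pvPlainKeys, String.ofList (b.toList ++ ['X']) ∈ pvAllKeys := by decide

set_option maxRecDepth 8192 in
set_option maxHeartbeats 4000000 in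
theorem pv_main (note : String) : normalize_note_pc note = PySem.Dict.get? pvTABLE (PySem.Str.upper (PySem.Str.strip note)) := by
  rw [normalize_note_pc.eq_def]
  generalize PySem.Str.upper (PySem.Str.strip note) = u
  by_cases h : u ∈ pvAllKeys
  · fin_cases h <;>
      first
        | decide
        | (simp only [reduceDIte, reduceIte]; rw [normalize_note_pc.eq_def]; decide)
  · have hget : PySem.Dict.get? pvTABLE u = none := by
      rw [PySem.Dict.get?_eq_none_iff_not_mem_keys, pv_keys_table]; exact h
    have halias : PySem.Dict.get? pvNOTE_ALIASES u = none := by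
      rw [PySem.Dict.get?_eq_none_iff_not_mem_keys]
      intro hm
      have hsub : ∀ x ∈ PySem.Dict.keys pvNOTE_ALIASES, x ∈ pvAllKeys := by decide
      exact h (hsub u hm)
    have hnames : u ∉ pvNOTE_NAMES := by
      intro hm
      have hsub : ∀ x ∈ pvNOTE_NAMES, x ∈ pvAllKeys := by decide
      exact h (hsub u hm)
    rw [hget]
    by_cases hx : PySem.Str.endswith u "X" = true
    · have hbase : ¬ (PySem.Str.slice u none (some (-1)) ∈ pvNOTE_NAMES ∨ pvNOTE_ALIASES.contains (PySem.Str.slice u none (some (-1))) = true) := by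
        intro hb
        have hbp : PySem.Str.slice u none (some (-1)) ∈ pvPlainKeys := by
          rcases hb with hb | hb
          · have hs : ∀ x ∈ pvNOTE_NAMES, x ∈ pvPlainKeys := by decide
            exact hs _ hb
          · have hk := (PySem.Dict.contains_iff_mem_keys pvNOTE_ALIASES _).mp hb
            have hs : ∀ x ∈ PySem.Dict.keys pvNOTE_ALIASES, x ∈ pvPlainKeys := by decide
            exact hs _ hk
        have hsuf := (PySem.Chars.endswith_iff u.toList "X".toList).mp (by rw [← PySem.Str.endswith_eq]; exact hx)
        rcases hsuf with ⟨t, ht⟩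
        have hbl : (PySem.Str.slice u none (some (-1))).toList = t := by
          rw [PySem.Str.slice_to_neg_one, ← ht]
          simp
        have hul : u.toList = (PySem.Str.slice u none (some (-1))).toList ++ ['X'] := by
          rw [hbl, ← ht]
          rfl
        have hu : u = String.ofList ((PySem.Str.slice u none (some (-1))).toList ++ ['X']) :=
          (String.ofList_eq.mpr hul.symm).symm
        exact h (hu ▸ pv_mk_mem _ hbp)
      simp only [hx, dite_eq_ite, if_true, if_neg hbase, halias, if_neg hnames]
    · simp only [dite_eq_ite, if_neg hx, halias, if_neg hnames]

-- ===== VERDICT (by name: the statement is the Claim_ definition above) =====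
theorem normalize_note_pc_spec : Claim_equal_normalize_note_pc := by
  intro note _
  unfold Spec_normalize_note_pc normalize_note_pc_alt
  exact pv_main note
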